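-- pv_equiv track=rewrite | github.com/Kojaewoong0504/jungle_8_algorithm | 백준/Gold/13869. Dating On－Line/Dating On－Line.py | make_zigzag
-- ===== SOURCE A (Python) =====
-- from collections import deque
--
-- def make_zigzag(arr, start_left: bool):
--     dq = deque()
--     left = start_left
--     for val in arr:
--         if left:
--             dq.appendleft(val)
--         else:
--             dq.append(val)
--         left = not left
--     return list(dq)
-- ===== SOURCE B (Python) =====
-- def make_zigzag(arr, start_left: bool):
--     arr = list(arr)
--     evens, odds = arr[0::2], arr[1::2]
--     if start_left:
--         return evens[::-1] + odds
--     return odds[::-1] + evens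
-- ===== Notes on version B (the rewrite author's own statement) =====
-- stated objective: simpler
-- what changed: Replaces the deque-building loop with per-element branching by two parity slices, one reverse and a concatenation.
import Mathlib
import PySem

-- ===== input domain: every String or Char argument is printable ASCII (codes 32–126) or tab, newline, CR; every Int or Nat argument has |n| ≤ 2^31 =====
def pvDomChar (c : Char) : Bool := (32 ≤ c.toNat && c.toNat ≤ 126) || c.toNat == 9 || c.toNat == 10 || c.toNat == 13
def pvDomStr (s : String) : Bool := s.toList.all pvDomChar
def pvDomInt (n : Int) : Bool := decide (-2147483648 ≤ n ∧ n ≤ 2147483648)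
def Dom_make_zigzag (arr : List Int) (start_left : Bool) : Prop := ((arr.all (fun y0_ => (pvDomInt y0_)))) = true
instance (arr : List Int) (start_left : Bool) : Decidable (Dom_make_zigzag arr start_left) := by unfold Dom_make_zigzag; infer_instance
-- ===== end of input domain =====

-- B replaces A's deque-building loop by two parity slices, a reverse and a concatenation (objective: simpler).

-- ===== PORT A =====
-- the 'for val in arr' loop over the state (dq, left); appendleft = cons, append = snoc
def zigLoop (arr : List Int) (dq : List Int) (left : Bool) : List Int :=
  match arr with
  | [] => dq
  | v :: t => zigLoop t (if left then v :: dq else dq ++ [v]) (!left)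

def make_zigzag (arr : List Int) (start_left : Bool) : List Int :=
  zigLoop arr [] start_left

-- ===== PORT B =====
-- arr[0::2] and arr[1::2] via PySem.List.slice?; [::-1] ported as List.reverse (its documented meaning)
def make_zigzag_alt (arr : List Int) (start_left : Bool) : List Int :=
  let evens := (PySem.List.slice? arr (some 0) none 2).getD []
  let odds := (PySem.List.slice? arr (some 1) none 2).getD []
  if start_left then evens.reverse ++ odds else odds.reverse ++ evens

-- ===== PRECONDITION & SPEC =====
def Spec_make_zigzag (arr : List Int) (start_left : Bool) (out : List Int) : Prop := out = make_zigzag_alt arr start_left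
instance (arr : List Int) (start_left : Bool) (out : List Int) : Decidable (Spec_make_zigzag arr start_left out) := by unfold Spec_make_zigzag; infer_instance

-- ===== CLAIM (what is proved, stated in full; the proofs are below) =====
def Claim_equal_make_zigzag : Prop := ∀ (arr : List Int) (start_left : Bool), Dom_make_zigzag arr start_left → Spec_make_zigzag arr start_left (make_zigzag arr start_left)

-- ===== LEMMAS AND PROOFS =====

-- elements of even positions / odd positions
def ev : List Int → List Int
  | [] => []
  | [x] => [x]
  | x :: _ :: t => x :: ev t

def od (l : List Int) : List Int := ev l.tail

theorem fm_ev : ∀ t : List Int,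
    List.filterMap (fun k : Nat => t[2*k]?) (List.range ((t.length+1)/2)) = ev t
  | [] => by simp [ev]
  | [x] => by simp [ev]
  | x :: y :: u => by
    have ih := fm_ev u
    have hc : (( (x :: y :: u).length + 1)/2) = (u.length+1)/2 + 1 := by
      simp; omega
    rw [hc, List.range_succ_eq_map, List.filterMap_cons, List.filterMap_map]
    have he : ((fun k : Nat => (x :: y :: u)[2*k]?) ∘ (fun k => k + 1)) = (fun k : Nat => u[2*k]?) := by
      funext k
      have h2 : 2*(k+1) = (2*k)+2 := by ring
      simp [Function.comp, h2]
    rw [he, ih]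
    simp [ev]

theorem slice0_eq_ev (arr : List Int) :
    PySem.List.slice? arr (some 0) none 2 = some (ev arr) := by
  simp only [PySem.List.slice?, PySem.List.sliceIndices]
  norm_num
  rw [← fm_ev arr]
  have hc : (if 0 < arr.length then (((arr.length : Int) + 2 - 1) / 2).toNat else 0)
      = (arr.length + 1)/2 := by
    split_ifs with h <;> omega
  rw [hc]
  congr 1

theorem slice1_eq_od (arr : List Int) :
    PySem.List.slice? arr (some 1) none 2 = some (od arr) := by
  cases arr with
  | nil => decide
  | cons x t =>
    simp only [PySem.List.slice?, PySem.List.sliceIndices]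
    norm_num
    rw [show od (x :: t) = ev t from rfl, ← fm_ev t]
    have hc : (if 0 < t.length then (((t.length : Int) + 2 - 1) / 2).toNat else 0)
        = (t.length + 1)/2 := by
      split_ifs with h <;> omega
    rw [hc]
    apply List.filterMap_congr
    intro k _
    have h2 : ((1 : Int) + 2 * (k:Int)).toNat = 2*k + 1 := by omega
    rw [h2]
    simp

theorem zigLoop_eq : ∀ (arr dq : List Int) (l : Bool),
    zigLoop arr dq l = (if l then ev arr else od arr).reverse ++ dq ++ (if l then od arr else ev arr) := by
  intro arr
  induction arr with
  | nil => intro dq l; cases l <;> simp [zigLoop, ev, od]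
  | cons v t ih =>
    intro dq l
    have hev : ev (v :: t) = v :: od t := by
      cases t <;> simp [ev, od]
    have hod : od (v :: t) = ev t := rfl
    cases l with
    | true =>
      rw [zigLoop, ih]
      simp [hev, hod, List.append_assoc]
    | false =>
      rw [zigLoop, ih]
      simp [hev, hod, List.append_assoc]

-- ===== VERDICT (by name: the statement is the Claim_ definition above) =====
theorem make_zigzag_spec : Claim_equal_make_zigzag := by
  intro arr start_left _
  unfold Spec_make_zigzag make_zigzag make_zigzag_alt
  rw [zigLoop_eq, slice0_eq_ev, slice1_eq_od]
  cases start_left <;> simp
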